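-- pv_equiv track=rewrite | github.com/open-gov-group/opengov-oscal-pyprivacy | src/opengov_oscal_pycore/diff.py | _normalize_deepdiff_path
-- ===== SOURCE A (Python) =====
-- def _normalize_deepdiff_path(path: str) -> str:
--     """Convert deepdiff paths like root['groups'][0] to groups[0].
--
--     Examples:
--         root['groups'][0]          -> groups[0]
--         root['metadata']['title']  -> metadata.title
--         root['groups'][0]['controls'][1]['props'][2]['value']
--             -> groups[0].controls[1].props[2].value
--     """
--     # Strip the "root" prefix
--     if path.startswith("root"):
--         path = path[4:]
--
--     # Convert ['key'] to .key  and [N] stays as [N]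
--     result_parts: list[str] = []
--     i = 0
--     while i < len(path):
--         if path[i] == "[":
--             end = path.index("]", i)
--             inner = path[i + 1 : end]
--             if inner.startswith("'") or inner.startswith('"'):
--                 # Dictionary key like ['groups'] -> .groups
--                 key = inner.strip("'\"")
--                 if result_parts:
--                     result_parts.append(f".{key}")
--                 else:
--                     result_parts.append(key)
--             else:
--                 # Numeric index like [0] -> [0]
--                 result_parts.append(f"[{inner}]")
--             i = end + 1
--         else:
--             result_parts.append(path[i])
--             i += 1
--
--     return "".join(result_parts)
-- ===== SOURCE B (Python) =====
-- def _normalize_deepdiff_path(path: str) -> str: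
--     # Split-based rewrite: cut the path at every '[' and rewrite each bracket
--     # group via str.partition, instead of scanning characters with an index.
--     if path.startswith("root"):
--         path = path[4:]
--     segments = path.split("[")
--     pieces = [segments[0]]
--     first = not segments[0]
--     for seg in segments[1:]:
--         inner, sep, rest = seg.partition("]")
--         if not sep:
--             raise ValueError("unmatched '[' in deepdiff path")
--         if inner[:1] in ("'", '"'):
--             key = inner.strip("'\"")
--             pieces.append(key if first else "." + key)
--         else:
--             pieces.append("[" + inner + "]")
--         pieces.append(rest)
--         first = False
--     return "".join(pieces)
-- ===== Notes on version B (the rewrite author's own statement) =====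
-- stated objective: idiomatic
-- what changed: Replaced A's index-driven character scan (manual path.index bookkeeping) by splitting the path on '[' once and rewriting each bracket group with str.partition in a single pass over the segments.
-- outside the precondition, e.g. on _normalize_deepdiff_path('[[0]]'): A returns '[[0]]', B raises ValueError
import Mathlib
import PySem

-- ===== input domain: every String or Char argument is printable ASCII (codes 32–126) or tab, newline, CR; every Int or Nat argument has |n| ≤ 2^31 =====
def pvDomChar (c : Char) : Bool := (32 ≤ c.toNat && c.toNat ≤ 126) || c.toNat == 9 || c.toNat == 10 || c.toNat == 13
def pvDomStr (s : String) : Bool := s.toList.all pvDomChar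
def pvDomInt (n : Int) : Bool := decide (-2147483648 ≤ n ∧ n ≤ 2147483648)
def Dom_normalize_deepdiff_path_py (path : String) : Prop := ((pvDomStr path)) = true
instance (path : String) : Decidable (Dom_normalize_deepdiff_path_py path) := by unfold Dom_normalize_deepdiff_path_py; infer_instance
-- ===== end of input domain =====

-- B rewrites A's index-driven character scan as a split-on-'[' pass over bracket groups (idiomatic decomposition, same cost).


-- shared by both ports: the quote test `inner.startswith("'") or inner.startswith('"')` applied to inner[:1]
def nddIsQuote (c : Char) : Bool := c = '\'' || c = '"'

-- ===== PORT A =====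
-- A's while-loop over the character index i, with the result_parts accumulator (parts are Python strings,
-- kept as List Char).  `path.index("]", i)` / the slice up to it are the takeWhile/dropWhile pair; where no
-- ']' follows, Python raises ValueError — those inputs are outside Pre_ (the totalized recursion just
-- continues past the end there).  inner.strip("'\"") is PySem.Chars.stripChars.
def nddLoopA (cs : List Char) (parts : List (List Char)) : List (List Char) :=
  match cs with
  | [] => parts
  | c :: rest =>
    if c = '[' then
      let inner := rest.takeWhile (· ≠ ']')
      let rest' := (rest.dropWhile (· ≠ ']')).drop 1
      let part : List Char :=
        if nddIsQuote (inner.headD ' ') then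
          if parts.isEmpty then PySem.Chars.stripChars inner ['\'', '"']
          else '.' :: PySem.Chars.stripChars inner ['\'', '"']
        else '[' :: (inner ++ [']'])
      nddLoopA rest' (parts ++ [part])
    else nddLoopA rest (parts ++ [[c]])
  termination_by cs.length
  decreasing_by
  · have h1 := List.length_dropWhile_le (p := fun x => decide (x ≠ ']')) (l := rest)
    simp only [List.length_cons, List.length_drop]
    omega
  · simp

def normalize_deepdiff_path_py (path : String) : String :=
  let cs0 := path.toList
  let cs := if PySem.Chars.startswith cs0 ['r', 'o', 'o', 't'] then cs0.drop 4 else cs0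
  -- "".join(result_parts)
  String.ofList (PySem.Chars.join [] (nddLoopA cs []))

-- ===== PORT B =====
-- B first splits on '[': hand port of Python's path.split("[") for the one-character separator "["
-- (exact: segments between occurrences of '[', empty segments kept, no maxsplit).
def nddSplit (sep : Char) (cs : List Char) : List (List Char) :=
  match cs with
  | [] => [[]]
  | c :: rest =>
    if c = sep then [] :: nddSplit sep rest
    else
      match nddSplit sep rest with
      | [] => [[c]]
      | s :: ss => (c :: s) :: ss

-- one loop iteration of B: seg.partition("]") (exact: inner = before the first ']', rest = after it;
-- the `if not sep: raise ValueError` case is outside Pre_), then the rewrite of the group.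
def nddSegB (first : Bool) (seg : List Char) : List Char :=
  let inner := seg.takeWhile (· ≠ ']')
  let rest := (seg.dropWhile (· ≠ ']')).drop 1
  (if nddIsQuote (inner.headD ' ') then
      (if first then PySem.Chars.stripChars inner ['\'', '"']
       else '.' :: PySem.Chars.stripChars inner ['\'', '"'])
    else '[' :: (inner ++ [']'])) ++ rest

def nddSegsB (first : Bool) (segs : List (List Char)) : List Char :=
  match segs with
  | [] => []
  | s :: rest => nddSegB first s ++ nddSegsB false rest

def normalize_deepdiff_path_py_alt (path : String) : String :=
  let cs0 := path.toList
  let cs := if PySem.Chars.startswith cs0 ['r', 'o', 'o', 't'] then cs0.drop 4 else cs0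
  match nddSplit '[' cs with
  | [] => ""
  | s0 :: segs => String.ofList (s0 ++ nddSegsB s0.isEmpty segs)

-- ===== PRECONDITION & SPEC =====
-- Pre_: after stripping the optional "root" prefix, every bracket group (every split-on-'[' segment after
-- the first) contains a closing ']'.  It excludes exactly the inputs with an unmatched '[': on most of them
-- A raises ValueError (path.index("]") fails); on the rest (a '[' nested before a later
-- group's ']', e.g. "[[0]]") A still returns a value (its scan finds the later ']') while B raises ValueError.
def Pre_normalize_deepdiff_path_py (path : String) : Prop :=
  ∀ seg ∈ (nddSplit '[' (if PySem.Chars.startswith path.toList ['r', 'o', 'o', 't'] then path.toList.drop 4 else path.toList)).tail,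
    ']' ∈ seg
instance (path : String) : Decidable (Pre_normalize_deepdiff_path_py path) := by
  unfold Pre_normalize_deepdiff_path_py; infer_instance

def pvWitness_normalize_deepdiff_path_py : String := "root['groups'][0]['title']"

def Spec_normalize_deepdiff_path_py (path : String) (out : String) : Prop := out = normalize_deepdiff_path_py_alt path
instance (path : String) (out : String) : Decidable (Spec_normalize_deepdiff_path_py path out) := by unfold Spec_normalize_deepdiff_path_py; infer_instance

-- ===== CLAIM (what is proved, stated in full; the proofs are below) =====
def Claim_equal_normalize_deepdiff_path_py : Prop := ∀ (path : String), Dom_normalize_deepdiff_path_py path → Pre_normalize_deepdiff_path_py path → Spec_normalize_deepdiff_path_py path (normalize_deepdiff_path_py path)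

-- ===== LEMMAS AND PROOFS =====

theorem nddSplit_ne_nil (sep : Char) (cs : List Char) : nddSplit sep cs ≠ [] := by
  cases cs with
  | nil => simp [nddSplit]
  | cons c rest =>
    simp only [nddSplit]
    split
    · simp
    · cases nddSplit sep rest <;> simp

theorem nddSplit_append_no_sep (sep : Char) (a b : List Char) (h : sep ∉ a) :
    nddSplit sep (a ++ b) = (nddSplit sep b).modifyHead (a ++ ·) := by
  induction a with
  | nil =>
    cases h' : nddSplit sep b with
    | nil => exact absurd h' (nddSplit_ne_nil sep b)
    | cons s ss => simp [h']
  | cons c a ih =>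
    have hc : ¬ c = sep := fun hcc => h (by simp [hcc])
    have ha : sep ∉ a := fun hm => h (by simp [hm])
    simp only [List.cons_append, nddSplit, if_neg hc, ih ha]
    cases h' : nddSplit sep b with
    | nil => exact absurd h' (nddSplit_ne_nil sep b)
    | cons s ss => simp

theorem nddSplit_head (sep : Char) (cs : List Char) :
    ∃ ss, nddSplit sep cs = cs.takeWhile (· ≠ sep) :: ss := by
  induction cs with
  | nil => exact ⟨[], rfl⟩
  | cons c rest ih =>
    obtain ⟨ss, hss⟩ := ih
    by_cases hc : c = sep
    · exact ⟨nddSplit sep rest, by simp [nddSplit, hc, List.takeWhile_cons]⟩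
    · exact ⟨ss, by simp [nddSplit, hc, hss, List.takeWhile_cons]⟩

-- if a ']' occurs before the next '[', then no '[' occurs before the first ']'
theorem nddNoLb (cs : List Char) (h : ']' ∈ cs.takeWhile (· ≠ '[')) :
    '[' ∉ cs.takeWhile (· ≠ ']') := by
  induction cs with
  | nil => simp at h
  | cons c rest ih =>
    by_cases hb : c = ']'
    · simp [List.takeWhile_cons, hb]
    · by_cases hl : c = '['
      · simp [List.takeWhile_cons, hl] at h
      · simp only [List.takeWhile_cons, hl, hb, decide_eq_true_eq, ← ne_eq, if_pos] at h ⊢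
        rw [if_pos (by simp [hl])] at h
        rw [if_pos (by simp [hb])]
        simp only [List.mem_cons] at h
        rcases h with h | h
        · exact absurd h.symm hb
        · intro hm
          simp only [List.mem_cons] at hm
          rcases hm with hm | hm
          · exact hl hm.symm
          · exact ih h hm

-- splitting a list at its first ']'
theorem nddSplitAtRb (inner tail : List Char) (hi : ']' ∉ inner) :
    (inner ++ ']' :: tail).takeWhile (· ≠ ']') = inner ∧
    ((inner ++ ']' :: tail).dropWhile (· ≠ ']')).drop 1 = tail := by
  induction inner with
  | nil => simp [List.takeWhile_cons, List.dropWhile_cons]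
  | cons c inner ih =>
    have hc : ¬ c = ']' := fun hcc => hi (by simp [hcc])
    have hi' : ']' ∉ inner := fun hm => hi (by simp [hm])
    obtain ⟨h1, h2⟩ := ih hi'
    refine ⟨?_, ?_⟩
    · simp only [List.cons_append, List.takeWhile_cons]
      rw [if_pos (by simp [hc])]
      rw [h1]
    · simp only [List.cons_append, List.dropWhile_cons]
      rw [if_pos (by simp [hc])]
      exact h2

-- existence of that decomposition
theorem nddDecomp (cs : List Char) (h : ']' ∈ cs) :
    ∃ inner tail, cs = inner ++ ']' :: tail ∧ ']' ∉ inner := by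
  induction cs with
  | nil => simp at h
  | cons c rest ih =>
    by_cases hb : c = ']'
    · exact ⟨[], rest, by simp [hb], by simp⟩
    · have h' : ']' ∈ rest := by
        simp only [List.mem_cons] at h
        rcases h with h | h
        · exact absurd h.symm hb
        · exact h
      obtain ⟨inner, tail, h1, h2⟩ := ih h'
      refine ⟨c :: inner, tail, by simp [h1], ?_⟩
      intro hm
      simp only [List.mem_cons] at hm
      rcases hm with hm | hm
      · exact hb hm.symm
      · exact h2 hm

-- one step of A's loop, in the two shapes
theorem nddLoopA_cons_bracket (rest : List Char) (parts : List (List Char)) :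
    nddLoopA ('[' :: rest) parts =
      nddLoopA ((rest.dropWhile (· ≠ ']')).drop 1)
        (parts ++ [if nddIsQuote ((rest.takeWhile (· ≠ ']')).headD ' ') then
            (if parts.isEmpty then PySem.Chars.stripChars (rest.takeWhile (· ≠ ']')) ['\'', '"']
             else '.' :: PySem.Chars.stripChars (rest.takeWhile (· ≠ ']')) ['\'', '"'])
          else '[' :: (rest.takeWhile (· ≠ ']') ++ [']'])]) := by
  rw [nddLoopA]
  simp

theorem nddLoopA_cons_char (c : Char) (rest : List Char) (parts : List (List Char))
    (hc : ¬ c = '[') : nddLoopA (c :: rest) parts = nddLoopA rest (parts ++ [[c]]) := by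
  rw [nddLoopA]
  simp [hc]

-- "".join is concatenation
theorem nddJoinNil (p : List (List Char)) : PySem.Chars.join [] p = p.flatten := by
  induction p with
  | nil => simp [PySem.Chars.join_nil]
  | cons x p ih =>
    cases p with
    | nil => simp [PySem.Chars.join_singleton]
    | cons y q =>
      rw [PySem.Chars.join_cons_cons]
      simp [ih]

-- the B-side result for a generalized first-emission flag
def nddAllB (cs : List Char) (b : Bool) : List Char :=
  match nddSplit '[' cs with
  | [] => []
  | s0 :: segs => s0 ++ nddSegsB (b && s0.isEmpty) segs

def nddWf (cs : List Char) : Prop := ∀ seg ∈ (nddSplit '[' cs).tail, ']' ∈ seg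

theorem nddMain (n : Nat) (cs : List Char) (parts : List (List Char))
    (hn : cs.length ≤ n) (hwf : nddWf cs) :
    (nddLoopA cs parts).flatten = parts.flatten ++ nddAllB cs parts.isEmpty := by
  induction n generalizing cs parts with
  | zero =>
    have : cs = [] := List.length_eq_zero_iff.mp (Nat.le_zero.mp hn)
    subst this
    simp [nddLoopA, nddAllB, nddSplit, nddSegsB]
  | succ n ih =>
    cases cs with
    | nil => simp [nddLoopA, nddAllB, nddSplit, nddSegsB]
    | cons c rest =>
      by_cases hc : c = '['
      · subst hc
        -- from Wf: the first bracket group closes, i.e. ']' ∈ first tail segment of the split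
        obtain ⟨ss0, hhead⟩ := nddSplit_head '[' rest
        have hsplit_cs : nddSplit '[' ('[' :: rest) = [] :: nddSplit '[' rest := by
          simp [nddSplit]
        have hmem : ']' ∈ rest.takeWhile (· ≠ '[') := by
          apply hwf (rest.takeWhile (· ≠ '['))
          rw [hsplit_cs, hhead]; simp
        have hmem' : ']' ∈ rest := (List.takeWhile_prefix _).subset hmem
        obtain ⟨inner, tail, hdec, hnoRb⟩ := nddDecomp rest hmem'
        obtain ⟨htk, hdrp⟩ := nddSplitAtRb inner tail hnoRb
        rw [← hdec] at htk hdrp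
        have hnoLb : '[' ∉ inner := htk ▸ nddNoLb rest hmem
        have hnoLbSeg : '[' ∉ inner ++ [']'] := by simp [hnoLb]
        have hsplit_rest : nddSplit '[' rest = (nddSplit '[' tail).modifyHead ((inner ++ [']']) ++ ·) := by
          conv_lhs => rw [hdec, show inner ++ ']' :: tail = (inner ++ [']']) ++ tail by simp]
          exact nddSplit_append_no_sep '[' _ _ hnoLbSeg
        cases htl : nddSplit '[' tail with
        | nil => exact absurd htl (nddSplit_ne_nil '[' tail)
        | cons t0 ts =>
          have hsplit_rest' : nddSplit '[' rest = (inner ++ ']' :: t0) :: ts := by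
            rw [hsplit_rest, htl]; simp
          have hwf_tail : nddWf tail := by
            intro seg hseg
            apply hwf seg
            rw [hsplit_cs, hsplit_rest']
            rw [htl] at hseg
            simp at hseg ⊢
            exact Or.inr hseg
          have hlen : tail.length ≤ n := by
            have : rest.length = inner.length + (tail.length + 1) := by rw [hdec]; simp
            simp only [List.length_cons] at hn
            omega
          rw [nddLoopA_cons_bracket, htk, hdrp, ih tail _ hlen hwf_tail]
          obtain ⟨htk0, hdrp0⟩ := nddSplitAtRb inner t0 hnoRb
          have hsegB : nddSegB parts.isEmpty (inner ++ ']' :: t0) =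
              (if nddIsQuote (inner.headD ' ') then
                (if parts.isEmpty then PySem.Chars.stripChars inner ['\'', '"']
                 else '.' :: PySem.Chars.stripChars inner ['\'', '"'])
                else '[' :: (inner ++ [']'])) ++ t0 := by
            rw [nddSegB]
            simp only [htk0, hdrp0]
          have hallB_cs : nddAllB ('[' :: rest) parts.isEmpty =
              nddSegB parts.isEmpty (inner ++ ']' :: t0) ++ nddSegsB false ts := by
            simp only [nddAllB, hsplit_cs, hsplit_rest', nddSegsB]
            simp
          have hallB_tail : nddAllB tail false = t0 ++ nddSegsB false ts := by
            simp [nddAllB, htl]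
          have hne : ∀ x : List Char, (parts ++ [x]).isEmpty = false := fun x => by simp
          rw [hne, hallB_tail, hallB_cs, hsegB]
          simp [List.flatten_append, List.append_assoc]
      · rw [nddLoopA_cons_char c rest parts hc]
        cases hr : nddSplit '[' rest with
        | nil => exact absurd hr (nddSplit_ne_nil '[' rest)
        | cons s ss =>
          have hsplit_cs : nddSplit '[' (c :: rest) = (c :: s) :: ss := by
            simp [nddSplit, hc, hr]
          have hwf_rest : nddWf rest := by
            intro seg hseg
            apply hwf seg
            rw [hsplit_cs]
            rw [hr] at hseg
            simpa using hseg
          have hlen : rest.length ≤ n := by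
            simp only [List.length_cons] at hn
            omega
          rw [ih rest _ hlen hwf_rest]
          have h1 : nddAllB (c :: rest) parts.isEmpty = c :: (s ++ nddSegsB false ss) := by
            simp only [nddAllB, hsplit_cs, List.isEmpty_cons, Bool.and_false, nddSegsB]
            simp
          have h2 : nddAllB rest false = s ++ nddSegsB false ss := by
            simp only [nddAllB, hr, Bool.false_and]
          have hne : ∀ x : List Char, (parts ++ [x]).isEmpty = false := fun x => by simp
          rw [hne, h2, h1]
          simp [List.flatten_append, List.append_assoc]

-- ===== VERDICT (by name: the statement is the Claim_ definition above) =====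
theorem normalize_deepdiff_path_py_spec : Claim_equal_normalize_deepdiff_path_py := by
  intro path _ hpre
  unfold Spec_normalize_deepdiff_path_py normalize_deepdiff_path_py normalize_deepdiff_path_py_alt
  unfold Pre_normalize_deepdiff_path_py at hpre
  set cs := if PySem.Chars.startswith path.toList ['r', 'o', 'o', 't'] then path.toList.drop 4 else path.toList with hcs
  have hwf : nddWf cs := hpre
  have hmain := nddMain cs.length cs [] le_rfl hwf
  simp only [List.isEmpty_nil, List.flatten_nil, List.nil_append] at hmain
  show String.ofList (PySem.Chars.join [] (nddLoopA cs [])) =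
    (match nddSplit '[' cs with
     | [] => ""
     | s0 :: segs => String.ofList (s0 ++ nddSegsB s0.isEmpty segs))
  rw [nddJoinNil, hmain]
  cases h : nddSplit '[' cs with
  | nil => exact absurd h (nddSplit_ne_nil '[' cs)
  | cons s0 segs =>
    simp only [nddAllB, h, Bool.true_and]
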